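-- pv_equiv track=rewrite | github.com/chase-michael/mit-6.0001 | ps3/ps3.py | is_valid_word
-- ===== SOURCE A (Python) =====
-- VOWELS = 'aeiou'
--
-- def is_valid_word(word, hand, word_list) -> bool:
--     """
--     Returns True if word is in the word_list and is entirely
--     composed of letters in the hand. Otherwise, returns False.
--     Does not mutate hand or word_list.
--     """
--     copy_hand = hand.copy()
--     # If letter not in hand or value is 0 (ie. used too many times), return False immediately. Otherwise, assumed True
--     word = word.lower()
--     for char in word:
--         if copy_hand.get(char, False) is False or copy_hand.get(char, False) == 0:
--             return False
--         copy_hand[char] -= 1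
--     # Check for wildcard possibilities
--     if word.find('*') != -1:
--         as_list = list(word)
--         new_word = ''
--         for char in VOWELS:
--             new_word = ''
--             as_list[word.find('*')] = char
--             for char in as_list:
--                 new_word += char
--             if new_word in word_list:
--                 return True
--         return False  # If no wildcard possibility is valid
--     return word in word_list  # If no wildcard and all chars in hand, check if word is valid.
-- ===== SOURCE B (Python) =====
-- VOWELS = 'aeiou'
--
-- def is_valid_word(word, hand, word_list) -> bool:
--     """
--     Returns True if word is in the word_list and is entirely
--     composed of letters in the hand. Otherwise, returns False.
--     Does not mutate hand or word_list.
--     """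
--     word = word.lower()
--     # Count each character of the word once, then compare the needed
--     # counts against the hand.
--     freq = {}
--     for ch in word:
--         freq[ch] = freq.get(ch, 0) + 1
--     if any(need > hand.get(ch, 0) for ch, need in freq.items()):
--         return False
--     if '*' in word:
--         i = word.find('*')
--         return any(word[:i] + v + word[i + 1:] in word_list for v in VOWELS)
--     return word in word_list
-- ===== Notes on version B (the rewrite author's own statement) =====
-- stated objective: idiomatic
-- what changed: Replaces A's incremental decrement-and-early-return scan over a mutated hand copy (plus a mutated char-list and char-by-char string rebuilding for the wildcard) with a build-a-frequency-table-then-compare-distinct-keys availability check and slice-based wildcard substitution tested with any(); Pre_ excludes inputs where the hand assigns a negative count to a letter of the word, a meaningless hand on which A's ==0 exhaustion test and B's count comparison both give defensible answers.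
-- outside the precondition, e.g. on is_valid_word('a', {'a': -1}, ['a']): A returns True, B returns False
import Mathlib
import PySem

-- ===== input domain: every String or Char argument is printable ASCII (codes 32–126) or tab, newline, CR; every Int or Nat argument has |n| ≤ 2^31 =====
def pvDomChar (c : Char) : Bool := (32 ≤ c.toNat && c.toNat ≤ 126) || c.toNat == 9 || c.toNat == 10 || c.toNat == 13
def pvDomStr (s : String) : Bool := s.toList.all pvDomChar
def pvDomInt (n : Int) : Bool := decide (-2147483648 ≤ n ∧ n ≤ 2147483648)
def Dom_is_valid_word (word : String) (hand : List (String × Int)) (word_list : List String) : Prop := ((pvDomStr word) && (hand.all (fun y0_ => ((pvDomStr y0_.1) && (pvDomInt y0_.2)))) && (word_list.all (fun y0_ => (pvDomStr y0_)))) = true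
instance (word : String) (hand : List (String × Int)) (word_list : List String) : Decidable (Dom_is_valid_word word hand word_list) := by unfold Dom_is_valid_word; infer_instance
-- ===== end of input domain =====

-- B replaces A's decrement-and-early-return scan of a mutated hand copy with a
-- frequency-table-vs-hand comparison and slice-based wildcard substitution; same
-- return value on Pre_, no speed claim. Neither version mutates its arguments.

-- ===== PORT A =====
-- a character used as a dict key is the one-character string (Python chars ARE strings)
def pvKey (c : Char) : String := String.ofList [c]

-- 'copy_hand[char] -= 1' on the association list: decrement the first matching entry
def pvDecFirst : List (String × Int) → String → List (String × Int)
  | [], _ => []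
  | (k, v) :: rest, s => if k == s then (k, v - 1) :: rest else (k, v) :: pvDecFirst rest s

-- A's availability loop: 'none' = the early 'return False', 'some d' = the loop finished with hand copy d
def pvAScan : List (String × Int) → List Char → Option (List (String × Int))
  | d, [] => some d
  | d, c :: cs =>
    match List.lookup (pvKey c) d with
    | none => none
    | some v => if v = 0 then none else pvAScan (pvDecFirst d (pvKey c)) cs

-- A's vowel loop: as_list is threaded (it is mutated in place in Python);
-- 'new_word += char' is ported as the same fold on the char-list side (String append is kernel-opaque)
def pvAVowels (word_list : List String) (i : Nat) : List Char → List Char → Bool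
  | _, [] => false
  | asList, v :: rest =>
    let as2 := asList.set i v
    let nw := String.ofList (as2.foldl (fun acc c => acc ++ [c]) [])
    if word_list.contains nw then true else pvAVowels word_list i as2 rest

def is_valid_word (word : String) (hand : List (String × Int)) (word_list : List String) : Bool :=
  let w := (PySem.Str.lower word).toList
  match pvAScan hand w with
  | none => false
  | some _ =>
    if PySem.Chars.find w ['*'] ≠ -1 then
      pvAVowels word_list (PySem.Chars.find w ['*']).toNat w "aeiou".toList
    else
      word_list.contains (String.ofList w)

-- ===== PORT B =====
def is_valid_word_alt (word : String) (hand : List (String × Int)) (word_list : List String) : Bool :=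
  let w := (PySem.Str.lower word).toList
  let freq := w.foldl (fun d c => d.insert (pvKey c) (d.getD (pvKey c) 0 + 1)) PySem.Dict.empty
  if freq.items.any (fun p => decide ((List.lookup p.1 hand).getD 0 < p.2)) then
    false
  else if PySem.Chars.isIn ['*'] w then
    let i := (PySem.Chars.find w ['*']).toNat
    ("aeiou".toList).any (fun v => word_list.contains (String.ofList (w.take i ++ [v] ++ w.drop (i + 1))))
  else
    word_list.contains (String.ofList w)

-- ===== PRECONDITION & SPEC =====
-- Pre_ excludes inputs where the hand assigns a NEGATIVE count to some letter of the
-- (lower-cased) word: a negative letter count is meaningless for a hand, and on such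
-- hands A's '== 0' exhaustion test and B's count comparison both give defensible answers.
def Pre_is_valid_word (word : String) (hand : List (String × Int)) (word_list : List String) : Prop :=
  ((PySem.Str.lower word).toList.all (fun c => decide (0 ≤ (List.lookup (pvKey c) hand).getD 0))) = true
instance (word : String) (hand : List (String × Int)) (word_list : List String) : Decidable (Pre_is_valid_word word hand word_list) := by unfold Pre_is_valid_word; infer_instance

def pvWitness_is_valid_word : String × (List (String × Int)) × List String :=
  ("a*", [("a", 2), ("*", 1)], ["at", "an"])

def Spec_is_valid_word (word : String) (hand : List (String × Int)) (word_list : List String) (out : Bool) : Prop := out = is_valid_word_alt word hand word_list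
instance (word : String) (hand : List (String × Int)) (word_list : List String) (out : Bool) : Decidable (Spec_is_valid_word word hand word_list out) := by unfold Spec_is_valid_word; infer_instance

-- ===== CLAIM (what is proved, stated in full; the proofs are below) =====
def Claim_equal_is_valid_word : Prop := ∀ (word : String) (hand : List (String × Int)) (word_list : List String), Dom_is_valid_word word hand word_list → Pre_is_valid_word word hand word_list → Spec_is_valid_word word hand word_list (is_valid_word word hand word_list)

-- ===== LEMMAS AND PROOFS =====

-- A's per-character availability test, abstracted over the needed count
def pvCheck (hand : List (String × Int)) (k : String) (n : Int) : Bool :=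
  match List.lookup k hand with
  | none => false
  | some v => !(decide (0 ≤ v) && decide (v < n))

-- B's per-distinct-character availability test
def pvCheckB (hand : List (String × Int)) (k : String) (n : Int) : Bool :=
  !(decide ((List.lookup k hand).getD 0 < n))

theorem pvCheck_none {hand : List (String × Int)} {k : String} (n : Int)
    (h : List.lookup k hand = none) : pvCheck hand k n = false := by
  simp [pvCheck, h]

theorem pvCheck_some {hand : List (String × Int)} {k : String} {v : Int} (n : Int)
    (h : List.lookup k hand = some v) :
    pvCheck hand k n = true ↔ (v < 0 ∨ n ≤ v) := by
  simp [pvCheck, h]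

theorem pvKey_injective : Function.Injective pvKey := by
  intro a b h
  have := congrArg String.toList h
  simpa [pvKey] using this

theorem lookup_pvDecFirst (d : List (String × Int)) (s t : String) :
    List.lookup t (pvDecFirst d s) =
      if t = s then (List.lookup s d).map (· - 1) else List.lookup t d := by
  induction d with
  | nil => by_cases hts : t = s <;> simp [pvDecFirst, hts]
  | cons p rest ih =>
    obtain ⟨k, v⟩ := p
    by_cases hks : k = s
    · subst hks
      by_cases hts : t = k
      · subst hts; simp [pvDecFirst, List.lookup]
      · simp [pvDecFirst, List.lookup, hts, beq_false_of_ne hts]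
    · have hks' : (k == s) = false := beq_false_of_ne hks
      by_cases hts : t = s
      · subst hts
        have h1 : (t == k) = false := beq_false_of_ne (fun h => hks (h ▸ rfl))
        simp [pvDecFirst, List.lookup, hks', h1, ih]
      · by_cases htk : t = k
        · subst htk; simp [pvDecFirst, List.lookup, hks', hts]
        · simp [pvDecFirst, List.lookup, hks', beq_false_of_ne htk, hts, ih]

-- A's scan succeeds exactly when every character passes the test with
-- its multiplicity in the whole scanned list
theorem pvAScan_eq_all (cs : List Char) :
    ∀ d : List (String × Int),
      (pvAScan d cs).isSome = cs.all (fun c => pvCheck d (pvKey c) ((cs.count c : Int))) := by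
  induction cs with
  | nil => intro d; simp [pvAScan]
  | cons c cs ih =>
    intro d
    match hl : List.lookup (pvKey c) d with
    | none =>
      simp only [pvAScan, hl, List.all_cons, pvCheck_none _ hl, Bool.false_and]
      rfl
    | some v =>
      by_cases hv : v = 0
      · subst hv
        have hc : pvCheck d (pvKey c) (((c :: cs).count c : Int)) = false := by
          rw [Bool.eq_false_iff]
          intro h
          have := (pvCheck_some _ hl).mp h
          have hcnt : 1 ≤ (c :: cs).count c := by
            simp [List.count_cons_self]
          omega
        rw [show pvAScan d (c :: cs) = none from by simp [pvAScan, hl]]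
        simp only [List.all_cons, hc, Bool.false_and, Option.isSome_none]
      · have hl' : List.lookup (pvKey c) (pvDecFirst d (pvKey c)) = some (v - 1) := by
          rw [lookup_pvDecFirst, if_pos rfl, hl]; rfl
        have hstep : (pvAScan d (c :: cs)).isSome
            = (pvAScan (pvDecFirst d (pvKey c)) cs).isSome := by
          simp [pvAScan, hl, hv]
        rw [hstep, ih]
        apply Bool.eq_iff_iff.mpr
        simp only [List.all_cons, Bool.and_eq_true, List.all_eq_true]
        have hcnt_eq : ∀ x : Char, x ≠ c →
            ((c :: cs).count x : Int) = ((cs.count x : Int)) := by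
          intro x hxc
          simp [Ne.symm hxc]
        have hfac_ne : ∀ x : Char, x ≠ c →
            (pvCheck (pvDecFirst d (pvKey c)) (pvKey x) ((cs.count x : Int))
              = pvCheck d (pvKey x) (((c :: cs).count x : Int))) := by
          intro x hxc
          have hkey : pvKey x ≠ pvKey c := fun he => hxc (pvKey_injective he)
          rw [hcnt_eq x hxc]
          simp only [pvCheck, lookup_pvDecFirst, if_neg hkey]
        constructor
        · intro h
          have hhead : pvCheck d (pvKey c) (((c :: cs).count c : Int)) = true := by
            rw [pvCheck_some _ hl]
            by_cases hmem : c ∈ cs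
            · have := (pvCheck_some _ hl').mp (h c hmem)
              have hcnt : (1 : Nat) ≤ cs.count c := List.count_pos_iff.mpr hmem
              have : ((c :: cs).count c : Int) = ((cs.count c : Int)) + 1 := by
                simp [List.count_cons_self]
              omega
            · have hcnt : cs.count c = 0 := List.count_eq_zero.mpr hmem
              have : ((c :: cs).count c : Int) = 1 := by
                simp [List.count_cons_self, hcnt]
              omega
          refine ⟨hhead, ?_⟩
          intro x hx
          by_cases hxc : x = c
          · subst hxc; exact hhead
          · rw [← hfac_ne x hxc]; exact h x hx
        · rintro ⟨hhead, h⟩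
          intro x hx
          by_cases hxc : x = c
          · subst hxc
            rw [pvCheck_some _ hl']
            have := (pvCheck_some _ hl).mp hhead
            have : ((x :: cs).count x : Int) = ((cs.count x : Int)) + 1 := by
              simp [List.count_cons_self]
            omega
          · rw [hfac_ne x hxc]; exact h x hx

-- B's any-loop over the frequency table is the negation of the per-character
-- pvCheckB test over the whole word
theorem pvFreq_any_eq (w : List Char) (hand : List (String × Int)) :
    ((w.foldl (fun d c => d.insert (pvKey c) (d.getD (pvKey c) 0 + 1)) PySem.Dict.empty).items.any
        (fun p => decide ((List.lookup p.1 hand).getD 0 < p.2)))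
      = !(w.all (fun c => pvCheckB hand (pvKey c) ((w.count c : Int)))) := by
  have hfold : w.foldl (fun d c => d.insert (pvKey c) (d.getD (pvKey c) 0 + 1)) PySem.Dict.empty
      = PySem.Dict.counter (w.map pvKey) := by
    rw [← PySem.Dict.foldl_insert_getD_add_one_eq_counter (w.map pvKey), List.foldl_map]
  have hany_all : ∀ (l : List (String × Int)) (f : String × Int → Bool),
      l.any f = !(l.all (fun p => !(f p))) := by
    intro l f
    simp [List.all_eq_not_any_not]
  rw [hfold, PySem.Dict.items_counter, hany_all]
  congr 1
  have hset : ∀ P : String → Bool,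
      (PySem.Set.ofList (w.map pvKey)).all P = (w.map pvKey).all P := by
    intro P
    apply Bool.eq_iff_iff.mpr
    simp only [List.all_eq_true]
    constructor
    · intro h x hx; exact h x ((PySem.Set.mem_ofList _ _).mpr hx)
    · intro h x hx; exact h x ((PySem.Set.mem_ofList _ _).mp hx)
  rw [List.all_map, hset, List.all_map]
  congr 1
  funext c
  simp only [Function.comp_apply]
  rw [List.count_map_of_injective _ _ pvKey_injective]
  rfl

-- under Pre_ (no negative count for a letter of the word) the two tests agree on the word
theorem all_check_eq (w : List Char) (hand : List (String × Int))
    (hpre : ∀ c ∈ w, 0 ≤ (List.lookup (pvKey c) hand).getD 0) :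
    w.all (fun c => pvCheck hand (pvKey c) ((w.count c : Int)))
      = w.all (fun c => pvCheckB hand (pvKey c) ((w.count c : Int))) := by
  apply Bool.eq_iff_iff.mpr
  simp only [List.all_eq_true]
  have hpt : ∀ c ∈ w, pvCheck hand (pvKey c) ((w.count c : Int))
      = pvCheckB hand (pvKey c) ((w.count c : Int)) := by
    intro c hc
    have hcnt : (1 : Int) ≤ (w.count c : Int) := by
      have : (1 : Nat) ≤ w.count c := List.count_pos_iff.mpr hc
      exact_mod_cast this
    match hl : List.lookup (pvKey c) hand with
    | none =>
      have : pvCheckB hand (pvKey c) ((w.count c : Int)) = false := by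
        simp only [pvCheckB, hl, Option.getD_none, Bool.not_eq_false', decide_eq_true_eq]
        omega
      rw [pvCheck_none _ hl, this]
    | some v =>
      have hv : 0 ≤ v := by have := hpre c hc; rwa [hl] at this
      simp only [pvCheck, pvCheckB, hl, Option.getD_some]
      by_cases h : v < (w.count c : Int) <;> simp [h] <;> omega
  constructor
  · intro h x hx; rw [← hpt x hx]; exact h x hx
  · intro h x hx; rw [hpt x hx]; exact h x hx

-- A's vowel loop, started from any list that coincides with w after writing position i,
-- is B's 'any' over the vowels
theorem pvAVowels_eq_any (word_list : List String) (i : Nat) (w : List Char) :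
    ∀ (vs a : List Char), (∀ v, a.set i v = w.set i v) →
      pvAVowels word_list i a vs
        = vs.any (fun v => word_list.contains (String.ofList (w.set i v))) := by
  intro vs
  induction vs with
  | nil => intro a _; simp [pvAVowels]
  | cons v rest ih =>
    intro a ha
    have hrec := ih (w.set i v) (fun u => List.set_set v)
    simp only [pvAVowels, PySem.List.foldl_append_singleton, List.nil_append, List.any_cons,
      ha v, hrec]
    by_cases hc : word_list.contains (String.ofList (w.set i v)) = true <;> simp_all

-- ===== VERDICT (by name: the statement is the Claim_ definition above) =====
set_option maxHeartbeats 1000000 in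
theorem is_valid_word_spec : Claim_equal_is_valid_word := by
  intro word hand word_list _hdom hpre
  simp only [Pre_is_valid_word, List.all_eq_true, decide_eq_true_eq] at hpre
  simp only [Spec_is_valid_word, is_valid_word, is_valid_word_alt]
  set w := (PySem.Str.lower word).toList with hw
  rw [pvFreq_any_eq, ← all_check_eq w hand hpre, ← pvAScan_eq_all]
  cases hscan : pvAScan hand w with
  | none => simp
  | some d =>
    simp only [Option.isSome_some, Bool.not_true, Bool.false_eq_true, if_false]
    by_cases hstar : ('*' : Char) ∈ w
    · have hinfix : ['*'] <:+: w := (List.singleton_infix_iff '*' w).mpr hstar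
      have hfind : PySem.Chars.find w ['*'] ≠ -1 :=
        (PySem.Chars.find_ne_neg_one_iff w ['*']).mpr hinfix
      have hisin : PySem.Chars.isIn ['*'] w = true :=
        (PySem.Chars.isIn_iff_infix ['*'] w).mpr hinfix
      have hnonneg : 0 ≤ PySem.Chars.find w ['*'] :=
        (PySem.Chars.find_nonneg_iff w ['*']).mpr hinfix
      set i := (PySem.Chars.find w ['*']).toNat with hi
      have hlt : i < w.length := by
        obtain ⟨t, ht⟩ := (PySem.Chars.find_spec (s := w) (sub := ['*']) hnonneg).1
        have hne : w.drop i ≠ [] := by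
          intro hnil; rw [hnil] at ht; simp at ht
        have hpos : 0 < (w.drop i).length := List.length_pos_iff.mpr hne
        simp only [List.length_drop] at hpos
        omega
      rw [if_pos hfind, hisin, if_pos rfl,
        pvAVowels_eq_any word_list i w "aeiou".toList w (fun _ => rfl)]
      congr 1
      funext v
      rw [List.set_eq_take_cons_drop v hlt]
      simp
    · have hninfix : ¬ ['*'] <:+: w := fun h => hstar ((List.singleton_infix_iff '*' w).mp h)
      have hfind : PySem.Chars.find w ['*'] = -1 :=
        (PySem.Chars.find_eq_neg_one_iff w ['*']).mpr hninfix
      have hisin : PySem.Chars.isIn ['*'] w = false := by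
        rw [PySem.Chars.isIn_eq_false_iff]; exact hninfix
      rw [hfind, hisin]
      simp
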